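-- pv_equiv track=rewrite | github.com/diwanshuydv/Metafusion_NLP | shared/sft/dataset_util.py | check_empty_assistant_responses
-- ===== SOURCE A (Python) =====
-- def check_empty_assistant_responses(dataset):
--     """Check for empty assistant responses in the dataset"""
--     empty_assistant_indices = []
--
--     for i, sample in enumerate(dataset):
--         text = sample['text']
--         # Split on assistant label
--         parts = text.split('<|im_start|>assistant')
--
--         # Check each assistant response (skip first part which is before any assistant)
--         for part in parts[1:]:
--             # Find the next label or end of string
--             next_label_pos = part.find('<|im_start|>')
--             if next_label_pos == -1:
--                 # No next label, check until end of string
--                 response = part.strip()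
--             else:
--                 # Next label found, check content until that point
--                 response = part[:next_label_pos].strip()
--
--             # If response is empty, record this sample
--             if response == '':
--                 empty_assistant_indices.append(i)
--                 break  # Found empty response in this sample
--
--     return empty_assistant_indices
-- ===== SOURCE B (Python) =====
-- def check_empty_assistant_responses(dataset):
--     """Check for empty assistant responses in the dataset"""
--     label = '<|im_start|>'
--     marker = label + 'assistant'
--
--     def ws_then_label_or_end(s):
--         # skip leading whitespace; an empty response ends at the next label or at end of string
--         j = 0
--         while j < len(s) and s[j].isspace():
--             j += 1
--         return j == len(s) or s.startswith(label, j)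
--
--     def has_empty(t):
--         # pattern scan: does the text match  marker (whitespace)* (label | end-of-string)  anywhere?
--         for j in range(len(t)):
--             if t.startswith(marker, j) and ws_then_label_or_end(t[j + len(marker):]):
--                 return True
--         return False
--
--     return [i for i, sample in enumerate(dataset) if has_empty(sample['text'])]
-- ===== Notes on version B (the rewrite author's own statement) =====
-- stated objective: alternative
-- what changed: B never splits the text into parts and never extracts/strips a response substring: it does a single position scan per text testing the local pattern 'marker, then whitespace run, then next label or end of string' (the regex <marker>\s*(?=<label>|$) done by hand), while A splits on the marker and strips each part up to the found next-label index; samples lacking the 'text' key are outside Pre_ since both Pythons raise KeyError there.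
import Mathlib
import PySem

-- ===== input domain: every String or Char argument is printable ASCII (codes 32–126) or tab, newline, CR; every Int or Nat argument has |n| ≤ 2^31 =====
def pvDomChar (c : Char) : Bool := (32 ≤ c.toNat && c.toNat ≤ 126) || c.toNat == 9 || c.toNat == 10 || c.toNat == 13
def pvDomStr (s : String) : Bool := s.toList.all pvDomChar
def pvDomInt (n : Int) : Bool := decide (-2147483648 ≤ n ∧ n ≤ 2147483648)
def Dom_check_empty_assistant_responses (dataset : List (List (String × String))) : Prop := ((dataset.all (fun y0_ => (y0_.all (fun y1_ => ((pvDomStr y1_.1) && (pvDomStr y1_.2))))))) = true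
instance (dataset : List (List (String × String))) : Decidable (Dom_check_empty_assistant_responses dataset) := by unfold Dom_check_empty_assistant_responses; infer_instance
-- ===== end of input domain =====

-- B replaces A's split-on-marker / strip-each-part parse by a single position scan per text for the
-- local pattern "marker, whitespace run, next label or end of string" (objective: alternative, same result).

-- ===== PORT A =====
-- sample['text']: first-match dict lookup; Pre_ guarantees the key exists (KeyError otherwise)
def pvTextA (sample : List (String × String)) : String :=
  ((PySem.Dict.mk sample).get? "text").getD ""

-- the inner `for part in parts[1:]` loop with its break
def pvLoopA (parts : List (List Char)) (i : Int) (acc : List Int) : List Int :=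
  match parts with
  | [] => acc
  | part :: rest =>
    let next_label_pos := PySem.Chars.find part "<|im_start|>".toList
    let response :=
      if next_label_pos = -1 then PySem.Chars.strip part
      else PySem.Chars.strip (PySem.List.slice part none (some next_label_pos))
    if response = [] then acc ++ [i] else pvLoopA rest i acc

def check_empty_assistant_responses (dataset : List (List (String × String))) : List Int :=
  (PySem.List.enumerate dataset).foldl
    (fun acc p =>
      let text := pvTextA p.2
      let parts := PySem.Chars.splitOn text.toList "<|im_start|>assistant".toList
      pvLoopA (parts.drop 1) p.1 acc) []

-- ===== PORT B =====
-- Python B's `label` and `marker = label + 'assistant'`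
def pvLabel : List Char := "<|im_start|>".toList
def pvMarker : List Char := "<|im_start|>assistant".toList

-- ws_then_label_or_end: skip leading whitespace chars, then end of string or the label starts here
def pvOkAfter (s : List Char) : Bool :=
  let w := s.dropWhile PySem.Chars.isspace
  w == [] || pvLabel.isPrefixOf w

-- has_empty: `for j in range(len(t))`, testing the pattern at each position j (recursion drops one char per step)
def pvHasEmptyB : List Char → Bool
  | [] => false
  | c :: rest =>
    if pvMarker.isPrefixOf (c :: rest) && pvOkAfter ((c :: rest).drop 21) then true
    else pvHasEmptyB rest

def check_empty_assistant_responses_alt (dataset : List (List (String × String))) : List Int :=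
  (PySem.List.enumerate dataset).filterMap
    (fun p => if pvHasEmptyB ((((PySem.Dict.mk p.2).get? "text").getD "").toList) then some p.1 else none)

-- ===== PRECONDITION & SPEC =====
-- Pre_ excludes samples lacking the key "text": the Python (both A and B) raises KeyError there.
def Pre_check_empty_assistant_responses (dataset : List (List (String × String))) : Prop :=
  (dataset.all (fun sample => (PySem.Dict.mk sample).contains "text")) = true
instance (dataset : List (List (String × String))) : Decidable (Pre_check_empty_assistant_responses dataset) := by unfold Pre_check_empty_assistant_responses; infer_instance

def pvWitness_check_empty_assistant_responses : (List (List (String × String))) :=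
  [[("text", "<|im_start|>assistant hi<|im_start|>user")], [("text", "<|im_start|>assistant\n<|im_start|>")]]

def Spec_check_empty_assistant_responses (dataset : List (List (String × String))) (out : List Int) : Prop := out = check_empty_assistant_responses_alt dataset
instance (dataset : List (List (String × String))) (out : List Int) : Decidable (Spec_check_empty_assistant_responses dataset out) := by unfold Spec_check_empty_assistant_responses; infer_instance

-- ===== CLAIM (what is proved, stated in full; the proofs are below) =====
def Claim_equal_check_empty_assistant_responses : Prop := ∀ (dataset : List (List (String × String))), Dom_check_empty_assistant_responses dataset → Pre_check_empty_assistant_responses dataset → Spec_check_empty_assistant_responses dataset (check_empty_assistant_responses dataset)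

-- ===== LEMMAS AND PROOFS =====

-- a hit of the 21-char marker leaves at least 21 chars behind it
theorem pvFindM_bounds (t : List Char) (h : ¬ PySem.Chars.find t pvMarker = -1) :
    0 ≤ PySem.Chars.find t pvMarker ∧ (PySem.Chars.find t pvMarker).toNat + 21 ≤ t.length := by
  have h1 := PySem.Chars.neg_one_le_find t pvMarker
  have h0 : 0 ≤ PySem.Chars.find t pvMarker := by omega
  have hs := (PySem.Chars.find_spec h0).1
  have hlen := hs.length_le
  rw [List.length_drop] at hlen
  have hM : pvMarker.length = 21 := by decide
  rw [hM] at hlen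
  exact ⟨h0, by omega⟩

-- proof-only intermediate: the marker-find walk A's chunk view reduces to
def pvScanB (t : List Char) : Bool :=
  let pos := PySem.Chars.find t pvMarker
  if hpos : pos = -1 then false
  else
    let t' := PySem.List.slice t (some (pos + 21)) none
    let nxt := PySem.Chars.find t' pvLabel
    let content := if nxt = -1 then t' else PySem.List.slice t' none (some nxt)
    if PySem.Chars.strip content = [] then true else pvScanB t'
termination_by t.length
decreasing_by
  obtain ⟨h0, hle⟩ := pvFindM_bounds t hpos
  rw [PySem.List.slice_from t (by omega : (0:Int) ≤ pos + 21)]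
  simp only [List.length_drop]
  omega

-- A's split, rebuilt as: first chunk, then the rest after the marker
def pvChunks (t : List Char) : List (List Char) :=
  let p := PySem.Chars.find t pvMarker
  if hp : p = -1 then [t]
  else t.take p.toNat :: pvChunks (t.drop (p.toNat + 21))
termination_by t.length
decreasing_by
  obtain ⟨h0, hle⟩ := pvFindM_bounds t hp
  simp only [List.length_drop]
  omega

-- find is characterised by "first occurrence"
theorem pv_find_eq_of (s sub : List Char) (n : Nat) (hocc : sub <+: s.drop n)
    (hmin : ∀ i < n, ¬ sub <+: s.drop i) : PySem.Chars.find s sub = n := by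
  have hin : PySem.Chars.isIn sub s = true :=
    (PySem.Chars.exists_prefix_drop_iff_isIn sub s).1 ⟨n, hocc⟩
  have h0 : 0 ≤ PySem.Chars.find s sub :=
    (PySem.Chars.find_nonneg_iff s sub).2 ((PySem.Chars.isIn_iff_infix sub s).1 hin)
  obtain ⟨hpre, hm⟩ := PySem.Chars.find_spec h0
  rcases lt_trichotomy (PySem.Chars.find s sub).toNat n with h | h | h
  · exact absurd hpre (hmin _ h)
  · omega
  · exact absurd hocc (hm n h)

theorem pv_find_neg (s sub : List Char) (h : ∀ i, ¬ sub <+: s.drop i) :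
    PySem.Chars.find s sub = -1 := by
  rw [PySem.Chars.find_eq_neg_one_iff]
  intro hinf
  obtain ⟨j, hj⟩ := (PySem.Chars.exists_prefix_drop_iff_isIn sub s).2
    ((PySem.Chars.isIn_iff_infix sub s).2 hinf)
  exact h j hj

theorem pv_find_cons (c : Char) (rest sub : List Char)
    (hnp : ¬ sub <+: (c :: rest)) :
    PySem.Chars.find (c :: rest) sub =
      if PySem.Chars.find rest sub = -1 then -1 else 1 + PySem.Chars.find rest sub := by
  split
  · next hneg =>
    have hno : ¬ sub <:+: rest := (PySem.Chars.find_eq_neg_one_iff rest sub).1 hneg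
    apply pv_find_neg
    intro i
    match i with
    | 0 => exact hnp
    | Nat.succ k =>
      intro hk
      exact hno ((PySem.Chars.isIn_iff_infix sub rest).1
        ((PySem.Chars.exists_prefix_drop_iff_isIn sub rest).1 ⟨k, hk⟩))
  · next hne =>
    have h1 := PySem.Chars.neg_one_le_find rest sub
    have h0 : 0 ≤ PySem.Chars.find rest sub := by omega
    obtain ⟨hpre, hm⟩ := PySem.Chars.find_spec h0
    have := pv_find_eq_of (c :: rest) sub ((PySem.Chars.find rest sub).toNat + 1)
      (by simpa using hpre)
      (by
        intro i hi
        match i with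
        | 0 => exact hnp
        | Nat.succ k => exact fun hk => hm k (by omega) hk)
    omega

theorem pv_modifyHead_id {α : Type} (xs : List α) : List.modifyHead (fun x => x) xs = xs := by
  cases xs <;> simp

theorem pv_chunks_cons (c : Char) (rest : List Char) (hnp : ¬ pvMarker <+: (c :: rest)) :
    pvChunks (c :: rest) = List.modifyHead (c :: ·) (pvChunks rest) := by
  have hf := pv_find_cons c rest pvMarker hnp
  by_cases hneg : PySem.Chars.find rest pvMarker = -1
  · rw [if_pos hneg] at hf
    have hrest : pvChunks rest = [rest] := by rw [pvChunks]; simp [hneg]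
    rw [pvChunks]
    simp [hf, hrest]
  · rw [if_neg hneg] at hf
    have h1 := PySem.Chars.neg_one_le_find rest pvMarker
    have hne' : ¬ PySem.Chars.find (c :: rest) pvMarker = -1 := by omega
    have ht : (PySem.Chars.find (c :: rest) pvMarker).toNat = (PySem.Chars.find rest pvMarker).toNat + 1 := by omega
    have hrest : pvChunks rest = rest.take (PySem.Chars.find rest pvMarker).toNat ::
        pvChunks (rest.drop ((PySem.Chars.find rest pvMarker).toNat + 21)) := by
      rw [pvChunks]; simp [hneg]
    rw [pvChunks]
    rw [dif_neg hne', ht, List.take_succ_cons]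
    have harith : (PySem.Chars.find rest pvMarker).toNat + 1 + 21
        = ((PySem.Chars.find rest pvMarker).toNat + 21) + 1 := by omega
    rw [harith, List.drop_succ_cons, hrest]
    simp [List.modifyHead]

theorem pv_go_eq (fuel : Nat) (l cur : List Char)
    (acc : List (List Char)) (hfuel : l.length < fuel) :
    PySem.Chars.splitOn.go pvMarker fuel l cur acc =
      acc.reverse ++ List.modifyHead (cur.reverse ++ ·) (pvChunks l) := by
  induction fuel generalizing l cur acc with
  | zero => omega
  | succ fuel ih =>
    match l with
    | [] =>
      rw [PySem.Chars.splitOn.go.eq_def]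
      have : pvChunks [] = [[]] := by rw [pvChunks]; simp; decide
      simp [this]
    | c :: rest =>
      rw [PySem.Chars.splitOn.go.eq_def]
      simp only []
      by_cases hp : pvMarker.isPrefixOf (c :: rest) = true
      · have hpre : pvMarker <+: (c :: rest) := List.isPrefixOf_iff_prefix.1 hp
        have hf0 : PySem.Chars.find (c :: rest) pvMarker = 0 :=
          pv_find_eq_of _ _ 0 (by simpa using hpre) (by omega)
        rw [if_pos hp]
        have hM : pvMarker.length = 21 := by decide
        have hlen : (List.drop pvMarker.length (c :: rest)).length < fuel := by
          simp only [List.length_drop, List.length_cons, hM] at hfuel ⊢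
          omega
        rw [ih _ _ _ hlen]
        have hchunks : pvChunks (c :: rest) = [] :: pvChunks (List.drop 21 (c :: rest)) := by
          rw [pvChunks]
          simp [hf0, hM]
        rw [hchunks, hM]
        simp [pv_modifyHead_id]
      · rw [if_neg hp]
        have hnp : ¬ pvMarker <+: (c :: rest) := fun h => hp (List.isPrefixOf_iff_prefix.2 h)
        have hlen : rest.length < fuel := by simp at hfuel; omega
        rw [ih _ _ _ hlen, pv_chunks_cons c rest hnp]
        rw [List.modifyHead_modifyHead]
        congr 1
        cases pvChunks rest with
        | nil => simp
        | cons a t => simp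

theorem pv_splitOn_eq (t : List Char) : PySem.Chars.splitOn t pvMarker = pvChunks t := by
  rw [PySem.Chars.splitOn, pv_go_eq (t.length + 1) t [] [] (by omega)]
  simp [pv_modifyHead_id]

-- the per-part check of A's inner loop, as a Bool
def pvChk (part : List Char) : Bool :=
  let nlp := PySem.Chars.find part pvLabel
  PySem.Chars.strip (if nlp = -1 then part else part.take nlp.toNat) == []

theorem pv_hLM : pvLabel <+: pvMarker := by decide

theorem pv_border : ∀ d < 12, 0 < d → ¬ ((pvLabel.drop d) <+: pvLabel) := by decide

-- KEY (A side): A's check of the chunk before the next marker = the check of the text after the current one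
theorem pv_head_chunk (rest : List Char) :
    pvChk (if PySem.Chars.find rest pvMarker = -1 then rest
        else rest.take (PySem.Chars.find rest pvMarker).toNat)
      = (PySem.Chars.strip (if PySem.Chars.find rest pvLabel = -1 then rest
          else rest.take (PySem.Chars.find rest pvLabel).toNat) == []) := by
  by_cases hm : PySem.Chars.find rest pvMarker = -1
  · rw [if_pos hm]; rfl
  · rw [if_neg hm]
    have hq0 : 0 ≤ PySem.Chars.find rest pvMarker := by
      have := PySem.Chars.neg_one_le_find rest pvMarker; omega
    set q : Nat := (PySem.Chars.find rest pvMarker).toNat with hqdef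
    obtain ⟨hMpre, hMmin⟩ := PySem.Chars.find_spec hq0
    have hLq : pvLabel <+: rest.drop q := pv_hLM.trans hMpre
    have hr0 : 0 ≤ PySem.Chars.find rest pvLabel :=
      (PySem.Chars.find_nonneg_iff rest pvLabel).2 ((PySem.Chars.isIn_iff_infix pvLabel rest).1
        ((PySem.Chars.exists_prefix_drop_iff_isIn pvLabel rest).1 ⟨q, hLq⟩))
    have hrne : ¬ PySem.Chars.find rest pvLabel = -1 := by omega
    set r : Nat := (PySem.Chars.find rest pvLabel).toNat with hrdef
    obtain ⟨hLpre, hLmin⟩ := PySem.Chars.find_spec hr0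
    have hrq : r ≤ q := by
      by_contra hgt
      exact hLmin q (by omega) hLq
    have hL12 : pvLabel.length = 12 := by decide
    by_cases hcase : r + 12 ≤ q
    · -- the label also fits inside the chunk: A finds it at the same place
      have hfind : PySem.Chars.find (rest.take q) pvLabel = (r : Int) := by
        apply pv_find_eq_of
        · rw [List.drop_take]
          exact List.prefix_take_iff.2 ⟨hLpre, by omega⟩
        · intro i hi h
          rw [List.drop_take] at h
          exact hLmin i hi (List.prefix_take_iff.1 h).1
      simp only [pvChk, hfind]
      have : ¬ ((r : Int) = -1) := by omega
      rw [if_neg this, if_neg hrne]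
      simp only [Int.toNat_natCast, List.take_take, ← hrdef]
      rw [Nat.min_eq_left hrq]
    · -- no label inside the chunk
      have hfind : PySem.Chars.find (rest.take q) pvLabel = -1 := by
        apply pv_find_neg
        intro i h
        rw [List.drop_take] at h
        obtain ⟨h1, h2⟩ := List.prefix_take_iff.1 h
        have hir : r ≤ i := by
          by_contra hlt
          exact hLmin i (by omega) h1
        omega
      simp only [pvChk, hfind]
      norm_num [if_neg hrne]
      -- now r = q, or the label would overlap itself
      rcases Nat.lt_or_ge r q with hlt | hge
      · exfalso
        set d : Nat := q - r with hddef
        have hd0 : 0 < d := by omega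
        have hd12 : d < 12 := by omega
        have hLq' : pvLabel <+: (rest.drop r).drop d := by
          rw [List.drop_drop]
          have : r + d = q := by omega
          rw [this]; exact hLq
        obtain ⟨v, hv⟩ := hLpre
        have hdrop : pvLabel.drop d <+: (rest.drop r).drop d := by
          rw [← hv, List.drop_append_of_le_length (by omega)]
          exact ⟨v, rfl⟩
        have : pvLabel.drop d <+: pvLabel :=
          List.prefix_of_prefix_length_le hdrop hLq' (by simp [hL12])
        exact pv_border d hd12 hd0 this
      · have : r = q := by omega
        rw [this]

theorem pv_loopA_eq (parts : List (List Char)) (i : Int) (acc : List Int) :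
    pvLoopA parts i acc = if parts.any pvChk then acc ++ [i] else acc := by
  induction parts with
  | nil => simp [pvLoopA]
  | cons part rest ih =>
    rw [pvLoopA]
    simp only [List.any_cons]
    have hL : "<|im_start|>".toList = pvLabel := rfl
    by_cases hn : PySem.Chars.find part pvLabel = -1
    · simp only [hL, hn, if_pos]
      by_cases hresp : PySem.Chars.strip part = []
      · simp [pvChk, hn, hresp]
      · simp [pvChk, hn, hresp, ih]
    · have h1 := PySem.Chars.neg_one_le_find part pvLabel
      have h0 : 0 ≤ PySem.Chars.find part pvLabel := by omega
      simp only [hL, hn, if_neg, PySem.List.slice_to part h0]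
      by_cases hresp : PySem.Chars.strip (part.take (PySem.Chars.find part pvLabel).toNat) = []
      · simp [pvChk, hn, hresp]
      · simp [pvChk, hn, hresp, ih]

theorem pvScanB_neg (t : List Char) (hp : PySem.Chars.find t pvMarker = -1) :
    pvScanB t = false := by
  rw [pvScanB.eq_def]
  simp only [hp]
  simp

theorem pvScanB_pos (t : List Char) (hp : ¬ PySem.Chars.find t pvMarker = -1) :
    pvScanB t =
      ((PySem.Chars.strip (if PySem.Chars.find (t.drop ((PySem.Chars.find t pvMarker).toNat + 21)) pvLabel = -1
          then t.drop ((PySem.Chars.find t pvMarker).toNat + 21)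
          else (t.drop ((PySem.Chars.find t pvMarker).toNat + 21)).take
            (PySem.Chars.find (t.drop ((PySem.Chars.find t pvMarker).toNat + 21)) pvLabel).toNat) == [])
        || pvScanB (t.drop ((PySem.Chars.find t pvMarker).toNat + 21))) := by
  obtain ⟨h0, hle⟩ := pvFindM_bounds t hp
  rw [pvScanB.eq_def]
  rw [dif_neg hp]
  have hslice : PySem.List.slice t (some (PySem.Chars.find t pvMarker + 21)) none
      = t.drop ((PySem.Chars.find t pvMarker).toNat + 21) := by
    rw [PySem.List.slice_from t (by omega : (0:Int) ≤ PySem.Chars.find t pvMarker + 21)]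
    congr 1
    omega
  rw [hslice]
  set t' := t.drop ((PySem.Chars.find t pvMarker).toNat + 21) with ht'
  by_cases hn : PySem.Chars.find t' pvLabel = -1
  · simp only [hn, if_pos]
    by_cases hresp : PySem.Chars.strip t' = []
    · simp [hresp]
    · simp [hresp]
  · have h1 := PySem.Chars.neg_one_le_find t' pvLabel
    have h0' : 0 ≤ PySem.Chars.find t' pvLabel := by omega
    simp only [hn, if_neg, PySem.List.slice_to t' h0']
    by_cases hresp : PySem.Chars.strip (t'.take (PySem.Chars.find t' pvLabel).toNat) = []
    · simp [hresp]
    · simp [hresp]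

theorem pv_chunks_any (t : List Char) : ((pvChunks t).drop 1).any pvChk = pvScanB t := by
  induction t using pvChunks.induct with
  | case1 t p hp =>
    have hp' : PySem.Chars.find t pvMarker = -1 := hp
    rw [pvChunks, dif_pos hp', pvScanB_neg t hp']
    simp
  | case2 t p hp ih =>
    have hp' : ¬ PySem.Chars.find t pvMarker = -1 := hp
    have ih' : ((pvChunks (t.drop ((PySem.Chars.find t pvMarker).toNat + 21))).drop 1).any pvChk
        = pvScanB (t.drop ((PySem.Chars.find t pvMarker).toNat + 21)) := ih
    rw [pvChunks, dif_neg hp']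
    simp only [List.drop_succ_cons, List.drop_zero]
    rw [pvScanB_pos t hp']
    set t' := t.drop ((PySem.Chars.find t pvMarker).toNat + 21) with ht'
    have hhead : (pvChunks t').any pvChk
        = (pvChk (if PySem.Chars.find t' pvMarker = -1 then t'
            else t'.take (PySem.Chars.find t' pvMarker).toNat)
           || ((pvChunks t').drop 1).any pvChk) := by
      rw [pvChunks]
      by_cases hm : PySem.Chars.find t' pvMarker = -1
      · simp [hm]
      · simp [hm]
    rw [hhead, pv_head_chunk, ih']

-- ===== bridge: the marker-find walk equals B's position scan =====

theorem pv_strip_nil_iff (s : List Char) :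
    PySem.Chars.strip s = [] ↔ ∀ x ∈ s, PySem.Chars.isspace x = true := by
  unfold PySem.Chars.strip PySem.Chars.rstrip PySem.Chars.lstrip
  rw [List.reverse_eq_nil_iff, List.dropWhile_eq_nil_iff]
  simp only [List.mem_reverse]
  constructor
  · intro h x hx
    rw [← List.takeWhile_append_dropWhile (p := PySem.Chars.isspace) (l := s),
      List.mem_append] at hx
    rcases hx with h1 | h2
    · exact List.mem_takeWhile_imp h1
    · exact h x h2
  · intro h x hx
    exact h x ((List.dropWhile_sublist _).mem hx)

-- a label prefix starts with '<'
theorem pv_label_head (z : List Char) (h : pvLabel <+: z) : z[0]? = some '<' := by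
  obtain ⟨v, hv⟩ := h
  rw [← hv]
  rfl

-- no label can start inside the leading-whitespace run
theorem pv_ws_no_label (s : List Char) (i : Nat)
    (hi : i < (s.takeWhile PySem.Chars.isspace).length) : ¬ pvLabel <+: s.drop i := by
  intro hpre
  have hlen : i < s.length := lt_of_lt_of_le hi (List.takeWhile_sublist _).length_le
  have hhead : (s.drop i)[0]? = some '<' := pv_label_head _ hpre
  rw [List.getElem?_drop, Nat.add_zero, List.getElem?_eq_getElem hlen] at hhead
  have hsi : s[i] = '<' := by injection hhead
  have hws : PySem.Chars.isspace s[i] = true := by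
    have hm := List.mem_takeWhile_imp (l := s) (p := PySem.Chars.isspace)
      (x := (s.takeWhile PySem.Chars.isspace)[i]) (List.getElem_mem hi)
    rwa [(List.takeWhile_prefix _).getElem hi] at hm
  rw [hsi] at hws
  exact absurd hws (by decide)

-- KEY (bridge): A's "strip the content up to the next label" test = B's pattern test
theorem pv_chk_eq_ok (s : List Char) :
    (PySem.Chars.strip (if PySem.Chars.find s pvLabel = -1 then s
        else s.take (PySem.Chars.find s pvLabel).toNat) == []) = pvOkAfter s := by
  rw [Bool.eq_iff_iff, beq_iff_eq]
  unfold pvOkAfter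
  set u := s.takeWhile PySem.Chars.isspace with hu
  set w := s.dropWhile PySem.Chars.isspace with hw
  have hsw : u ++ w = s := List.takeWhile_append_dropWhile
  simp only [Bool.or_eq_true, beq_iff_eq, List.isPrefixOf_iff_prefix]
  by_cases hwnil : w = []
  · -- s is all whitespace: no label anywhere, strip s = []
    have hall : ∀ x ∈ s, PySem.Chars.isspace x = true := by
      intro x hx
      rw [← hsw, hwnil, List.append_nil] at hx
      exact List.mem_takeWhile_imp hx
    have hno : PySem.Chars.find s pvLabel = -1 := by
      apply pv_find_neg
      intro i hpre
      have hh := pv_label_head _ hpre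
      rw [List.getElem?_drop, Nat.add_zero] at hh
      have hilen : i < s.length := by
        by_contra hge
        rw [List.getElem?_eq_none (by omega)] at hh
        simp at hh
      rw [List.getElem?_eq_getElem hilen] at hh
      have hlt : s[i] = '<' := by injection hh
      have hws := hall s[i] (List.getElem_mem hilen)
      rw [hlt] at hws
      exact absurd hws (by decide)
    rw [if_pos hno, pv_strip_nil_iff]
    constructor
    · intro _; left; exact hwnil
    · intro _; exact hall
  · have hwhead : ¬ PySem.Chars.isspace (w.head hwnil) = true := by
      intro hc
      have hf : PySem.Chars.isspace (w.head hwnil) = false :=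
        List.head_dropWhile_not PySem.Chars.isspace hwnil
      rw [hf] at hc
      exact Bool.false_ne_true hc
    have hwlen : 0 < w.length := List.length_pos_iff.2 hwnil
    have hulen : u.length < s.length := by
      rw [← hsw, List.length_append]; omega
    have hmin : ∀ i < u.length, ¬ pvLabel <+: s.drop i := fun i hi => pv_ws_no_label s i hi
    by_cases hlab : pvLabel <+: w
    · -- label right after the whitespace run
      have hocc : pvLabel <+: s.drop u.length := by
        rw [← hsw, List.drop_append_of_le_length (le_refl _), List.drop_length, List.nil_append]
        exact hlab
      have hfind : PySem.Chars.find s pvLabel = (u.length : Int) :=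
        pv_find_eq_of s pvLabel u.length hocc hmin
      rw [hfind]
      have : ¬ ((u.length : Int) = -1) := by omega
      rw [if_neg this]
      simp only [Int.toNat_natCast]
      have htake : s.take u.length = u := by
        rw [← hsw, List.take_append_of_le_length (le_refl _), List.take_length]
      rw [htake, pv_strip_nil_iff]
      constructor
      · intro _; right; exact hlab
      · intro _ x hx; exact List.mem_takeWhile_imp hx
    · -- no label at the whitespace boundary: both sides false
      have hrhs : ¬ (w = [] ∨ pvLabel <+: w) := by
        rintro (h | h); exact hwnil h; exact hlab h
      -- the non-whitespace char w.head sits at index u.length of s, before any label occurrence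
      have hsu : s[u.length]'hulen = w.head hwnil := by
        have hdw : s.drop u.length = w := by
          rw [← hsw, List.drop_append_of_le_length (le_refl _), List.drop_length, List.nil_append]
        have hopt : s[u.length]? = some (w.head hwnil) := by
          have h0 : (s.drop u.length)[0]? = some (w.head hwnil) := by
            rw [hdw, ← List.head?_eq_getElem?, List.head?_eq_some_head]
          rwa [List.getElem?_drop, Nat.add_zero] at h0
        rw [List.getElem?_eq_getElem hulen] at hopt
        injection hopt
      by_cases hno : PySem.Chars.find s pvLabel = -1
      · rw [if_pos hno, pv_strip_nil_iff]
        constructor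
        · intro hall
          exact absurd (hall _ (hsu ▸ List.getElem_mem hulen)) hwhead
        · intro h; exact absurd h hrhs
      · have hr0 : 0 ≤ PySem.Chars.find s pvLabel := by
          have := PySem.Chars.neg_one_le_find s pvLabel; omega
        obtain ⟨hLpre, hLmin⟩ := PySem.Chars.find_spec hr0
        set r : Nat := (PySem.Chars.find s pvLabel).toNat with hrdef
        have hur : u.length < r := by
          rcases Nat.lt_trichotomy r u.length with h | h | h
          · exact absurd hLpre (hmin r h)
          · exfalso
            apply hlab
            rw [← hsw, h, List.drop_append_of_le_length (le_refl _), List.drop_length,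
              List.nil_append] at hLpre
            exact hLpre
          · exact h
        rw [if_neg hno, pv_strip_nil_iff]
        constructor
        · intro hall
          have hrlen : r ≤ s.length := by
            have := hLpre.length_le
            rw [List.length_drop] at this
            have hL12 : pvLabel.length = 12 := by decide
            omega
          have hmem : s[u.length]'hulen ∈ s.take r := by
            rw [List.mem_take_iff_getElem]
            exact ⟨u.length, by omega, rfl⟩
          exact absurd (hall _ hmem) (hsu ▸ hwhead)
        · intro h; exact absurd h hrhs

-- pvHasEmptyB on a text with no marker occurrence
theorem pv_has_skip (k : Nat) (s : List Char)
    (h : ∀ j < k, ¬ pvMarker <+: s.drop j) : pvHasEmptyB s = pvHasEmptyB (s.drop k) := by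
  induction k generalizing s with
  | zero => simp
  | succ k ih =>
    match s with
    | [] => simp [pvHasEmptyB]
    | c :: rest =>
      have h0 : ¬ pvMarker <+: (c :: rest) := h 0 (by omega)
      have hpf : pvMarker.isPrefixOf (c :: rest) = false := by
        rw [← Bool.not_eq_true, List.isPrefixOf_iff_prefix]; exact h0
      rw [pvHasEmptyB, hpf]
      simp only [Bool.false_and, if_neg (Bool.false_ne_true)]
      rw [List.drop_succ_cons]
      exact ih rest (fun j hj => by
        have := h (j + 1) (by omega)
        rwa [List.drop_succ_cons] at this)

theorem pv_has_none (s : List Char) (h : ∀ j, ¬ pvMarker <+: s.drop j) :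
    pvHasEmptyB s = false := by
  rw [pv_has_skip s.length s (fun j _ => h j), List.drop_length]
  rfl

-- at a marker occurrence the scan tests the pattern and moves on
theorem pv_has_at (s : List Char) (h : pvMarker <+: s) :
    pvHasEmptyB s = (pvOkAfter (s.drop 21) || pvHasEmptyB (s.drop 1)) := by
  match s with
  | [] =>
    exfalso
    have hle := h.length_le
    have hM : pvMarker.length = 21 := by decide
    rw [hM] at hle
    simp at hle
  | c :: rest =>
    have hpf : pvMarker.isPrefixOf (c :: rest) = true := List.isPrefixOf_iff_prefix.2 h
    rw [pvHasEmptyB, hpf]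
    simp only [Bool.true_and, List.drop_succ_cons, List.drop_one, List.tail_cons]
    by_cases hok : pvOkAfter (List.drop 21 (c :: rest)) = true
    · simp [hok]
    · simp only [Bool.not_eq_true] at hok
      simp [hok]

-- markers cannot overlap ('<' occurs only at index 0 of the marker)
theorem pv_marker_border : ∀ d < 21, 0 < d → ¬ ((pvMarker.drop d) <+: pvMarker) := by decide

theorem pv_no_overlap (s : List Char) (h : pvMarker <+: s) (j : Nat) (hj0 : 0 < j)
    (hj : j < 21) : ¬ pvMarker <+: s.drop j := by
  intro h2
  obtain ⟨v, hv⟩ := h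
  have hM21 : pvMarker.length = 21 := by decide
  have hdrop : pvMarker.drop j <+: s.drop j := by
    rw [← hv, List.drop_append_of_le_length (by omega)]
    exact ⟨v, rfl⟩
  have hlen2 := h2.length_le
  rw [List.length_drop] at hlen2
  have hM : pvMarker.length = 21 := by decide
  have : pvMarker.drop j <+: pvMarker :=
    List.prefix_of_prefix_length_le hdrop h2 (by rw [List.length_drop, hM]; omega)
  exact pv_marker_border j hj hj0 this

-- the walk and the scan agree
theorem pv_scan_eq_has_aux (n : Nat) : ∀ t : List Char, t.length ≤ n → pvScanB t = pvHasEmptyB t := by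
  induction n with
  | zero =>
    intro t ht
    have hnil : t = [] := List.eq_nil_of_length_eq_zero (by omega)
    subst hnil
    rw [pvScanB_neg [] (by decide)]
    rfl
  | succ n ih =>
    intro t ht
    by_cases hpos : PySem.Chars.find t pvMarker = -1
    · rw [pvScanB_neg t hpos, pv_has_none t (by
        intro j hpre
        exact (by
          rw [PySem.Chars.find_ne_neg_one_iff]
          exact (PySem.Chars.isIn_iff_infix pvMarker t).1
            ((PySem.Chars.exists_prefix_drop_iff_isIn pvMarker t).1 ⟨j, hpre⟩) :
          PySem.Chars.find t pvMarker ≠ -1) hpos)]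
    · obtain ⟨h0, hle⟩ := pvFindM_bounds t hpos
      obtain ⟨hMpre, hMmin⟩ := PySem.Chars.find_spec h0
      set p : Nat := (PySem.Chars.find t pvMarker).toNat with hpdef
      rw [pvScanB_pos t hpos]
      -- right side: walk the scan up to p, step over the marker, then skip the overlap zone
      rw [pv_has_skip p t hMmin, pv_has_at _ hMpre]
      have hdd : (t.drop p).drop 21 = t.drop (p + 21) := by
        rw [List.drop_drop]
      have hskip : pvHasEmptyB ((t.drop p).drop 1) = pvHasEmptyB (t.drop (p + 21)) := by
        rw [pv_has_skip 20 ((t.drop p).drop 1) (fun j hj => by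
          rw [List.drop_drop, List.drop_drop]
          have h2 := pv_no_overlap (t.drop p) hMpre (1 + j) (by omega) (by omega)
          rwa [List.drop_drop] at h2)]
        simp only [List.drop_drop]
      rw [hdd, hskip, pv_chk_eq_ok (t.drop (p + 21)),
        ih (t.drop (p + 21)) (by rw [List.length_drop]; omega)]

theorem pv_scan_eq_has (t : List Char) : pvScanB t = pvHasEmptyB t :=
  pv_scan_eq_has_aux t.length t le_rfl

-- per sample: A's inner loop = B's pattern scan
theorem pv_sample (s : List (String × String)) (i : Int) (acc : List Int) :
    pvLoopA ((PySem.Chars.splitOn (pvTextA s).toList "<|im_start|>assistant".toList).drop 1) i acc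
      = if pvHasEmptyB ((((PySem.Dict.mk s).get? "text").getD "").toList) then acc ++ [i] else acc := by
  have hM : "<|im_start|>assistant".toList = pvMarker := rfl
  rw [hM, pv_splitOn_eq, pv_loopA_eq, pv_chunks_any, pv_scan_eq_has]
  rfl

theorem pv_fold (l : List (Int × List (String × String))) (acc : List Int) :
    l.foldl (fun acc p =>
        pvLoopA ((PySem.Chars.splitOn (pvTextA p.2).toList "<|im_start|>assistant".toList).drop 1) p.1 acc) acc
      = acc ++ l.filterMap (fun p =>
          if pvHasEmptyB ((((PySem.Dict.mk p.2).get? "text").getD "").toList) then some p.1 else none) := by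
  induction l generalizing acc with
  | nil => simp
  | cons p rest ih =>
    simp only [List.foldl_cons, List.filterMap_cons]
    rw [pv_sample]
    by_cases h : pvHasEmptyB ((((PySem.Dict.mk p.2).get? "text").getD "").toList)
    · rw [if_pos h, ih]
      simp [h]
    · rw [if_neg h, ih]
      simp [h]

-- ===== VERDICT (by name: the statement is the Claim_ definition above) =====
theorem check_empty_assistant_responses_spec : Claim_equal_check_empty_assistant_responses := by
  intro ds _hdom _hpre
  show check_empty_assistant_responses ds = check_empty_assistant_responses_alt ds
  exact pv_fold (PySem.List.enumerate ds) []
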